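-- pv_equiv track=rewrite | github.com/Jordan-deJong/atp_svm | atp_api.py | players
-- ===== SOURCE A (Python) =====
-- def players(row, player_data):
--     p = []
--     found_both = 0
--     for player_search in [row[6], row[8]]:
--         for player in player_data:
--             if player_search == player[0]:
--                 ps = list(player)
--                 ps.pop(0)
--                 p.extend(ps)
--                 found_both += 1
--     return(p, found_both)
-- ===== SOURCE B (Python) =====
-- def players(row, player_data):
--     # One fused pass over player_data: each searched name gets its own
--     # accumulator, concatenated at the end (A scans player_data once per name).
--     a, b = row[6], row[8]
--     p1, p2 = [], []
--     n1, n2 = 0, 0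
--     for pl in player_data:
--         name = pl[0]
--         if name == a:
--             p1 += pl[1:]
--             n1 += 1
--         if name == b:
--             p2 += pl[1:]
--             n2 += 1
--     return (p1 + p2, n1 + n2)
-- ===== Notes on version B (the rewrite author's own statement) =====
-- stated objective: alternative
-- what changed: B traverses player_data once, maintaining a separate (attributes, count) accumulator per searched name and concatenating them at the end, instead of A's outer loop over the two names that rescans player_data per name.
import Mathlib
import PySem

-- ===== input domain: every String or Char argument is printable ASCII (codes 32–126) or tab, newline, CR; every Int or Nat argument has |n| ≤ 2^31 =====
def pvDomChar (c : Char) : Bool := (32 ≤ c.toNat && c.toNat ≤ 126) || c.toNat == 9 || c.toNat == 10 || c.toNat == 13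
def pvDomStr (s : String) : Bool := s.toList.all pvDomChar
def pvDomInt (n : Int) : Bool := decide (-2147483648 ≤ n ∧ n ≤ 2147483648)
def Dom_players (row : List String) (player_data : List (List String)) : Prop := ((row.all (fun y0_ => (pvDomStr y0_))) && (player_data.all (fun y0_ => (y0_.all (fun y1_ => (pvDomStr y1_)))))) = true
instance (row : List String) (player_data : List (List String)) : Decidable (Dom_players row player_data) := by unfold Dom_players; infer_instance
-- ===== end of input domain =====

-- B makes ONE fused pass over player_data with a separate (attributes, count) accumulator per
-- searched name, concatenated at the end, instead of A's rescan of player_data per name.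

-- ===== PORT A =====
def players (row : List String) (player_data : List (List String)) : List String × Int :=
  match PySem.List.pyGet? row 6, PySem.List.pyGet? row 8 with
  | some n6, some n8 =>
    [n6, n8].foldl (fun acc player_search =>
      player_data.foldl (fun acc2 player =>
        match player with
        | [] => acc2  -- Python raises IndexError on player[0]; excluded by Pre_players
        | h :: t => if player_search == h then (acc2.1 ++ t, acc2.2 + 1) else acc2) acc)
      ([], 0)
  | _, _ => ([], 0)  -- Python raises IndexError on row[6]/row[8]; excluded by Pre_players

-- ===== PORT B =====
def players_alt (row : List String) (player_data : List (List String)) : List String × Int :=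
  match PySem.List.pyGet? row 6 with
  | none => ([], 0)  -- Python raises IndexError on row[6]; excluded by Pre_players
  | some a =>
    match PySem.List.pyGet? row 8 with
    | none => ([], 0)  -- Python raises IndexError on row[8]; excluded by Pre_players
    | some b =>
      let s := player_data.foldl
        (fun (st : List String × List String × Int × Int) pl =>
          match pl with
          | name :: attrs =>
            let st := if name == a then (st.1 ++ attrs, st.2.1, st.2.2.1 + 1, st.2.2.2) else st
            if name == b then (st.1, st.2.1 ++ attrs, st.2.2.1, st.2.2.2 + 1) else st
          | [] => st)  -- Python raises IndexError on pl[0]; excluded by Pre_players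
        ([], [], 0, 0)
      (s.1 ++ s.2.1, s.2.2.1 + s.2.2.2)

-- ===== PRECONDITION & SPEC =====
-- Pre_ excludes exactly the inputs where Python A raises IndexError: rows shorter than 9
-- (row[6]/row[8]) and player_data containing an empty player (player[0]).
def Pre_players (row : List String) (player_data : List (List String)) : Prop :=
  9 ≤ row.length ∧ ∀ pl ∈ player_data, pl ≠ []
instance (row : List String) (player_data : List (List String)) : Decidable (Pre_players row player_data) := by unfold Pre_players; infer_instance
def pvWitness_players : List String × List (List String) :=
  (["a", "b", "c", "d", "e", "f", "X", "g", "Y"], [["X", "1", "2"], ["Y", "3"]])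
def Spec_players (row : List String) (player_data : List (List String)) (out : List String × Int) : Prop := out = players_alt row player_data
instance (row : List String) (player_data : List (List String)) (out : List String × Int) : Decidable (Spec_players row player_data out) := by unfold Spec_players; infer_instance

-- ===== CLAIM (what is proved, stated in full; the proofs are below) =====
def Claim_equal_players : Prop := ∀ (row : List String) (player_data : List (List String)), Dom_players row player_data → Pre_players row player_data → Spec_players row player_data (players row player_data)

-- ===== LEMMAS AND PROOFS =====

/-- the attribute lists of the players named `name`, in player_data order -/
def pvMatches (name : String) (pd : List (List String)) : List (List String) :=
  pd.filterMap (fun pl => match pl with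
    | [] => none
    | h :: t => if name == h then some t else none)

theorem pvMatches_cons_cons (name h : String) (t : List String) (pd : List (List String)) :
    pvMatches name ((h :: t) :: pd) =
      if name == h then t :: pvMatches name pd else pvMatches name pd := by
  simp only [pvMatches, List.filterMap_cons]
  by_cases hh : name == h <;> simp [hh]

/-- A's inner scan over player_data equals appending the matched attributes. -/
theorem pvA_inner (name : String) (pd : List (List String)) (p : List String) (c : Int) :
    pd.foldl (fun (acc2 : List String × Int) player =>
        match player with
        | [] => acc2
        | h :: t => if name == h then (acc2.1 ++ t, acc2.2 + 1) else acc2) (p, c)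
      = (p ++ (pvMatches name pd).flatten, c + (pvMatches name pd).length) := by
  induction pd generalizing p c with
  | nil => simp [pvMatches]
  | cons pl rest ih =>
    cases pl with
    | nil => simp only [List.foldl_cons]; rw [ih]; rfl
    | cons h t =>
      simp only [List.foldl_cons]
      by_cases hh : (name == h) = true
      · rw [if_pos hh, ih, pvMatches_cons_cons, if_pos hh]
        simp [List.append_assoc]; omega
      · rw [if_neg hh, ih, pvMatches_cons_cons, if_neg hh]

/-- B's fused pass maintains the two accumulators as the matched attributes of each name. -/
theorem pvB_pass (a b : String) (pd : List (List String))
    (p1 p2 : List String) (c1 c2 : Int) :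
    pd.foldl (fun (st : List String × List String × Int × Int) pl =>
        match pl with
        | name :: attrs =>
          let st := if name == a then (st.1 ++ attrs, st.2.1, st.2.2.1 + 1, st.2.2.2) else st
          if name == b then (st.1, st.2.1 ++ attrs, st.2.2.1, st.2.2.2 + 1) else st
        | [] => st)
      (p1, p2, c1, c2)
      = (p1 ++ (pvMatches a pd).flatten, p2 ++ (pvMatches b pd).flatten,
         c1 + (pvMatches a pd).length, c2 + (pvMatches b pd).length) := by
  induction pd generalizing p1 p2 c1 c2 with
  | nil => simp [pvMatches]
  | cons pl rest ih =>
    cases pl with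
    | nil => simp only [List.foldl_cons]; rw [ih]; rfl
    | cons h t =>
      simp only [List.foldl_cons]
      rw [pvMatches_cons_cons, pvMatches_cons_cons]
      by_cases ha : h = a <;> by_cases hb : h = b <;>
        [ (have ha' : (h == a) = true := by simp [ha]
           have hb' : (h == b) = true := by simp [hb]
           have ha2 : (a == h) = true := by simp [ha]
           have hb2 : (b == h) = true := by simp [hb]
           simp only [ha', hb', ha2, hb2, ite_true]);
          (have ha' : (h == a) = true := by simp [ha]
           have hb' : (h == b) = false := by simp; exact hb
           have ha2 : (a == h) = true := by simp [ha]
           have hb2 : (b == h) = false := by simp; exact Ne.symm hb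
           simp only [ha', hb', ha2, hb2, ite_true, ite_false]);
          (have ha' : (h == a) = false := by simp; exact ha
           have hb' : (h == b) = true := by simp [hb]
           have ha2 : (a == h) = false := by simp; exact Ne.symm ha
           have hb2 : (b == h) = true := by simp [hb]
           simp only [ha', hb', ha2, hb2, ite_true, ite_false]);
          (have ha' : (h == a) = false := by simp; exact ha
           have hb' : (h == b) = false := by simp; exact hb
           have ha2 : (a == h) = false := by simp; exact Ne.symm ha
           have hb2 : (b == h) = false := by simp; exact Ne.symm hb
           simp only [ha', hb', ha2, hb2, ite_false])] <;>
        rw [ih] <;>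
        simp [List.append_assoc, Prod.ext_iff] <;>
        omega

-- ===== VERDICT (by name: the statement is the Claim_ definition above) =====
theorem players_spec : Claim_equal_players := by
  intro row pd _hdom hpre
  unfold Spec_players players players_alt
  obtain ⟨hlen, -⟩ := hpre
  have h6 : PySem.List.pyGet? row 6 = some row[6] := by
    simp only [PySem.List.pyGet?, PySem.List.pyIdx?]
    rw [if_pos (by norm_num : (0:Int) ≤ 6), if_pos (by exact_mod_cast by omega : (6:Int) < (row.length:Int))]
    simp
  have h8 : PySem.List.pyGet? row 8 = some row[8] := by
    simp only [PySem.List.pyGet?, PySem.List.pyIdx?]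
    rw [if_pos (by norm_num : (0:Int) ≤ 8), if_pos (by exact_mod_cast by omega : (8:Int) < (row.length:Int))]
    simp
  rw [h6, h8]
  simp only [List.foldl_cons, List.foldl_nil]
  rw [pvA_inner, pvA_inner, pvB_pass]
  simp
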